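-- pv_equiv track=rewrite | github.com/schouten-pepijn/ai_agents_projects | Gradio_ui_agents/gradio_ai_debate_club/debate.py | parse_judgement
-- ===== SOURCE A (Python) =====
-- def parse_judgement(text: str):
--     """
--     Parse the moderator's judgement text to extract the winner and rationale.
--
--     Args:
--         text (str): The judgement text from the moderator.
--
--     Returns:
--         tuple: A tuple containing the winner (str) and rationale (str).
--     """
--     winner = "tie"
--     rationale = ""
--
--     for line in text.splitlines():
--         s = line.strip()
--
--         if s.upper().startswith("WINNER:"):
--             w = s.split(":", 1)[1].strip().lower()
--
--             if w in ("pro", "con", "tie"):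
--                 winner = w
--
--         elif s.upper().startswith("RATIONALE:"):
--             rationale = s.split(":", 1)[1].strip()
--
--     return winner, rationale or text.strip()
-- ===== SOURCE B (Python) =====
-- def parse_judgement(text: str):
--     """Scan the lines back-to-front, stopping as soon as both the last valid
--     WINNER and the last RATIONALE have been found."""
--     winner = None
--     rationale = None
--     for line in reversed(text.splitlines()):
--         s = line.strip()
--         u = s.upper()
--         if winner is None and u.startswith("WINNER:"):
--             w = s.split(":", 1)[1].strip().lower()
--             if w in ("pro", "con", "tie"):
--                 winner = w
--         elif rationale is None and u.startswith("RATIONALE:"):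
--             rationale = s.split(":", 1)[1].strip()
--         if winner is not None and rationale is not None:
--             break
--     return (winner if winner is not None else "tie",
--             rationale if rationale else text.strip())
-- ===== Notes on version B (the rewrite author's own statement) =====
-- stated objective: alternative
-- what changed: Replaces the forward stateful fold (last valid WINNER / last RATIONALE win) by a back-to-front scan with Option accumulators that stops early once the first (i.e. last-in-text) valid WINNER and RATIONALE lines are both found.
import Mathlib
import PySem

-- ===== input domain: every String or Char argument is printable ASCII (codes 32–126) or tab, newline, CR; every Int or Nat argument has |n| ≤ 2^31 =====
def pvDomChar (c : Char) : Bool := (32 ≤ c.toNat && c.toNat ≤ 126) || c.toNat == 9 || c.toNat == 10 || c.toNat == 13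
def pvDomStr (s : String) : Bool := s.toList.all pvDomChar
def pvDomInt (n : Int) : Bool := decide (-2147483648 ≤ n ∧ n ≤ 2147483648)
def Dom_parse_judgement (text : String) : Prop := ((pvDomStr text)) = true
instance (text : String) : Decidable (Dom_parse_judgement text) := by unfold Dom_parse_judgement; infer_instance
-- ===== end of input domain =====

-- B replaces A's forward stateful fold by a back-to-front scan with Option accumulators
-- and an early break once both fields are found (alternative decomposition, same cost).


-- s.split(":", 1)[1] — both Pythons only reach it when s contains ':', so the
-- option is `some` and the list has ≥ 2 pieces: the defaults are never used.
def afterColon (s : String) : String :=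
  ((PySem.Str.splitMax? s ":" 1).getD []).getD 1 ""

-- ===== PORT A =====
-- loop body of A's forward `for line in text.splitlines()` with state (winner, rationale)
def stepA (st : String × String) (line : String) : String × String :=
  let s := PySem.Str.strip line
  if PySem.Str.startswith (PySem.Str.upper s) "WINNER:" then
    let w := PySem.Str.lower (PySem.Str.strip (afterColon s))
    if w = "pro" ∨ w = "con" ∨ w = "tie" then (w, st.2) else st
  else if PySem.Str.startswith (PySem.Str.upper s) "RATIONALE:" then
    (st.1, PySem.Str.strip (afterColon s))
  else st

def parse_judgement (text : String) : String × String :=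
  let st := (PySem.Str.splitlines text).foldl stepA ("tie", "")
  -- `return winner, rationale or text.strip()`
  (st.1, if st.2 = "" then PySem.Str.strip text else st.2)

-- ===== PORT B =====
-- B's reversed loop: Option accumulators, `break` when both are found
def altLoop : List String → Option String → Option String → Option String × Option String
  | [], w, r => (w, r)
  | line :: rest, w, r =>
    let s := PySem.Str.strip line
    let u := PySem.Str.upper s
    if w.isNone && PySem.Str.startswith u "WINNER:" then
      let v := PySem.Str.lower (PySem.Str.strip (afterColon s))
      let w' := if v = "pro" ∨ v = "con" ∨ v = "tie" then some v else w
      if w'.isSome && r.isSome then (w', r) else altLoop rest w' r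
    else if r.isNone && PySem.Str.startswith u "RATIONALE:" then
      let r' := some (PySem.Str.strip (afterColon s))
      if w.isSome && r'.isSome then (w, r') else altLoop rest w r'
    else
      if w.isSome && r.isSome then (w, r) else altLoop rest w r

def parse_judgement_alt (text : String) : String × String :=
  let wr := altLoop (PySem.Str.splitlines text).reverse none none
  ((match wr.1 with | some v => v | none => "tie"),
   (match wr.2 with
    | some v => if v = "" then PySem.Str.strip text else v
    | none => PySem.Str.strip text))

-- ===== PRECONDITION & SPEC =====
def Spec_parse_judgement (text : String) (out : String × String) : Prop := out = parse_judgement_alt text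
instance (text : String) (out : String × String) : Decidable (Spec_parse_judgement text out) := by unfold Spec_parse_judgement; infer_instance

-- ===== CLAIM (what is proved, stated in full; the proofs are below) =====
def Claim_equal_parse_judgement : Prop := ∀ (text : String), Dom_parse_judgement text → Spec_parse_judgement text (parse_judgement text)

-- ===== LEMMAS AND PROOFS =====

-- first valid WINNER value in scanning order (= last one in A's forward order when applied to the reverse)
def fw : List String → Option String
  | [] => none
  | l :: ls =>
    let s := PySem.Str.strip l
    if PySem.Str.startswith (PySem.Str.upper s) "WINNER:" then
      let v := PySem.Str.lower (PySem.Str.strip (afterColon s))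
      if v = "pro" ∨ v = "con" ∨ v = "tie" then some v else fw ls
    else fw ls

-- first RATIONALE value in scanning order
def fr : List String → Option String
  | [] => none
  | l :: ls =>
    let s := PySem.Str.strip l
    if PySem.Str.startswith (PySem.Str.upper s) "RATIONALE:" then
      some (PySem.Str.strip (afterColon s))
    else fr ls

lemma eW : "WINNER:".toList = ['W','I','N','N','E','R',':'] := by decide

lemma eR : "RATIONALE:".toList = ['R','A','T','I','O','N','A','L','E',':'] := by decide

lemma not_winner_rationale (u : List Char)
    (h : PySem.Chars.startswith u ['W','I','N','N','E','R',':'] = true) :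
    PySem.Chars.startswith u ['R','A','T','I','O','N','A','L','E',':'] = false := by
  rw [PySem.Chars.startswith_iff] at h
  by_contra hne
  rw [Bool.not_eq_false, PySem.Chars.startswith_iff] at hne
  obtain ⟨t1, ht1⟩ := h
  obtain ⟨t2, ht2⟩ := hne
  rw [← ht1] at ht2
  simp at ht2

lemma altLoop_eq (ls : List String) : ∀ (w r : Option String),
    altLoop ls w r = (w.orElse (fun _ => fw ls), r.orElse (fun _ => fr ls)) := by
  induction ls with
  | nil => intro w r; cases w <;> cases r <;> simp [altLoop, fw, fr, Option.orElse]
  | cons l ls ih =>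
    intro w r
    by_cases hw : PySem.Chars.startswith (PySem.Chars.upper (PySem.Chars.strip l.toList))
        ['W','I','N','N','E','R',':'] = true
    · have hr := not_winner_rationale _ hw
      cases w <;> cases r <;>
        simp only [altLoop, fw, fr, PySem.Str.startswith_eq, PySem.Str.toList_upper,
          PySem.Str.toList_strip, eW, eR, hw, hr, Option.isNone_none, Option.isNone_some,
          Bool.true_and, Bool.false_and, if_true, if_false, Bool.false_eq_true,
          Option.isSome_some, Option.isSome_none, Bool.and_true, Bool.and_false, ih] <;>
          split_ifs <;> simp_all [Option.orElse]
    · by_cases hr : PySem.Chars.startswith (PySem.Chars.upper (PySem.Chars.strip l.toList))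
          ['R','A','T','I','O','N','A','L','E',':'] = true
      · cases w <;> cases r <;>
          simp only [altLoop, fw, fr, PySem.Str.startswith_eq, PySem.Str.toList_upper,
            PySem.Str.toList_strip, eW, eR, hw, hr, Option.isNone_none, Option.isNone_some,
            Bool.true_and, Bool.false_and, if_true, if_false, Bool.false_eq_true,
            Option.isSome_some, Option.isSome_none, Bool.and_true, Bool.and_false, ih] <;>
            simp [hw, Option.orElse]
      · cases w <;> cases r <;>
          simp only [altLoop, fw, fr, PySem.Str.startswith_eq, PySem.Str.toList_upper,
            PySem.Str.toList_strip, eW, eR, Option.isNone_none, Option.isNone_some,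
            Bool.true_and, Bool.false_and, Option.isSome_some, Option.isSome_none,
            Bool.and_true, Bool.and_false, ih] <;>
            simp [hw, hr, Option.orElse]

lemma fw_append (xs ys : List String) :
    fw (xs ++ ys) = (fw xs).orElse (fun _ => fw ys) := by
  induction xs with
  | nil => simp [fw, Option.orElse]
  | cons l ls ih =>
    simp only [List.cons_append, fw, ih]
    split_ifs <;> simp [Option.orElse]

lemma fr_append (xs ys : List String) :
    fr (xs ++ ys) = (fr xs).orElse (fun _ => fr ys) := by
  induction xs with
  | nil => simp [fr, Option.orElse]
  | cons l ls ih =>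
    simp only [List.cons_append, fr, ih]
    split_ifs <;> simp [Option.orElse]

lemma stepA_eq (st : String × String) (l : String) :
    stepA st l = ((fw [l]).getD st.1, (fr [l]).getD st.2) := by
  by_cases hw : PySem.Chars.startswith (PySem.Chars.upper (PySem.Chars.strip l.toList))
      ['W','I','N','N','E','R',':'] = true
  · have hr := not_winner_rationale _ hw
    simp only [stepA, fw, fr, PySem.Str.startswith_eq, PySem.Str.toList_upper,
      PySem.Str.toList_strip, eW, eR, hw, hr, if_true, if_false, Bool.false_eq_true]
    split_ifs <;> simp
  · by_cases hr : PySem.Chars.startswith (PySem.Chars.upper (PySem.Chars.strip l.toList))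
        ['R','A','T','I','O','N','A','L','E',':'] = true
    · simp [stepA, fw, fr, eW, eR, hw, hr]
    · simp [stepA, fw, fr, eW, eR, hw, hr]

lemma getD_orElse' (x y : Option String) (d : String) :
    (x.orElse (fun _ => y)).getD d = x.getD (y.getD d) := by
  cases x <;> simp [Option.orElse]

lemma foldA_eq (ls : List String) : ∀ (w0 r0 : String),
    ls.foldl stepA (w0, r0) = ((fw ls.reverse).getD w0, (fr ls.reverse).getD r0) := by
  induction ls with
  | nil => intro w0 r0; simp [fw, fr]
  | cons l ls ih =>
    intro w0 r0
    have h1 : stepA (w0, r0) l = ((fw [l]).getD w0, (fr [l]).getD r0) := stepA_eq _ _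
    simp only [List.foldl_cons, h1, ih, List.reverse_cons, fw_append, fr_append,
      getD_orElse']

-- ===== VERDICT (by name: the statement is the Claim_ definition above) =====
theorem parse_judgement_spec : Claim_equal_parse_judgement := by
  intro text _
  unfold Spec_parse_judgement parse_judgement parse_judgement_alt
  rw [altLoop_eq, foldA_eq ((PySem.Str.splitlines text)) "tie" ""]
  cases hw : fw (PySem.Str.splitlines text).reverse <;>
    cases hr : fr (PySem.Str.splitlines text).reverse <;>
      simp [Option.orElse]
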